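-- pv_equiv track=rewrite | github.com/sgbmzm/mtDNA_tool | mtDNA_tool_simple.py | compare_aligned_sequences
-- ===== SOURCE A (Python) =====
-- def compare_aligned_sequences(reference_sequence, user_sequence, reference_name, ignore_n):
--     best_match_index = -1
--     min_differences = len(user_sequence) + 1
--     differences = []
--     ignored_n_count = 0
--
--     for i in range(len(reference_sequence) - len(user_sequence) + 1):
--         current_differences = []
--         current_ignored_n_count = 0
--         for j in range(len(user_sequence)):
--             if user_sequence[j] != reference_sequence[i + j]:
--                 if ignore_n and user_sequence[j] == 'N':
--                     current_ignored_n_count += 1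
--                 else:
--                     if reference_name == "RSRS":
--                         current_differences.append(f"{reference_sequence[i + j]}{i + j + 1}{user_sequence[j]}")
--                     else:
--                         current_differences.append(f"[{reference_sequence[i + j]}]{i + j + 1}{user_sequence[j]}")
--         if len(current_differences) < min_differences:
--             min_differences = len(current_differences)
--             best_match_index = i
--             differences = current_differences
--             ignored_n_count = current_ignored_n_count
--
--     if best_match_index == -1:
--         return f"The sequence was not found in the {reference_name} sequence"
--
--     start_pos = best_match_index + 1
--     end_pos = best_match_index + len(user_sequence)
--     result = f"The entered sequence including {len(user_sequence)} positions\n"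
--     result += f"The entered sequence matches positions {start_pos} to {end_pos} in the {reference_name} sequence\n"
--     if differences:
--         result += f"There are {len(differences)} differences between the entered sequence and the {reference_name} sequence:\n" + "\n".join(differences)
--     else:
--         result += f"There are no differences between the entered sequence and the {reference_name} sequence"
--
--     if ignore_n and ignored_n_count > 0:
--         result += f"\n\nNote: The list of differences ignores {ignored_n_count} differences caused by 'N' in the input sequence."
--
--     return result
-- ===== SOURCE B (Python) =====
-- def compare_aligned_sequences(reference_sequence, user_sequence, reference_name, ignore_n):
--     n = len(reference_sequence)
--     m = len(user_sequence)
--     if n < m: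
--         return f"The sequence was not found in the {reference_name} sequence"
--
--     # Phase 1: integer mismatch counts per offset (no strings built here).
--     counts = [
--         sum(1 for j in range(m)
--             if user_sequence[j] != reference_sequence[i + j]
--             and not (ignore_n and user_sequence[j] == 'N'))
--         for i in range(n - m + 1)
--     ]
--
--     # Phase 2: first argmin.
--     best = 0
--     for i in range(1, len(counts)):
--         if counts[i] < counts[best]:
--             best = i
--
--     # Phase 3: reconstruct the report only for the best offset.
--     diffs = [
--         (f"{reference_sequence[best + j]}{best + j + 1}{user_sequence[j]}"
--          if reference_name == "RSRS"
--          else f"[{reference_sequence[best + j]}]{best + j + 1}{user_sequence[j]}")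
--         for j in range(m)
--         if user_sequence[j] != reference_sequence[best + j]
--         and not (ignore_n and user_sequence[j] == 'N')
--     ]
--     ignored = sum(1 for j in range(m)
--                   if user_sequence[j] == 'N'
--                   and user_sequence[j] != reference_sequence[best + j]) if ignore_n else 0
--
--     result = f"The entered sequence including {m} positions\n"
--     result += f"The entered sequence matches positions {best + 1} to {best + m} in the {reference_name} sequence\n"
--     if diffs:
--         result += f"There are {len(diffs)} differences between the entered sequence and the {reference_name} sequence:\n" + "\n".join(diffs)
--     else:
--         result += f"There are no differences between the entered sequence and the {reference_name} sequence"
--     if ignore_n and ignored > 0: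
--         result += f"\n\nNote: The list of differences ignores {ignored} differences caused by 'N' in the input sequence."
--     return result
-- ===== Notes on version B (the rewrite author's own statement) =====
-- stated objective: alternative
-- what changed: A builds a list of formatted difference strings for every alignment offset and keeps the best-so-far; B first computes only integer mismatch counts per offset, takes the first argmin over that counts list, and then reconstructs the difference strings and ignored-N count once, for the winning offset only.
import Mathlib
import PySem

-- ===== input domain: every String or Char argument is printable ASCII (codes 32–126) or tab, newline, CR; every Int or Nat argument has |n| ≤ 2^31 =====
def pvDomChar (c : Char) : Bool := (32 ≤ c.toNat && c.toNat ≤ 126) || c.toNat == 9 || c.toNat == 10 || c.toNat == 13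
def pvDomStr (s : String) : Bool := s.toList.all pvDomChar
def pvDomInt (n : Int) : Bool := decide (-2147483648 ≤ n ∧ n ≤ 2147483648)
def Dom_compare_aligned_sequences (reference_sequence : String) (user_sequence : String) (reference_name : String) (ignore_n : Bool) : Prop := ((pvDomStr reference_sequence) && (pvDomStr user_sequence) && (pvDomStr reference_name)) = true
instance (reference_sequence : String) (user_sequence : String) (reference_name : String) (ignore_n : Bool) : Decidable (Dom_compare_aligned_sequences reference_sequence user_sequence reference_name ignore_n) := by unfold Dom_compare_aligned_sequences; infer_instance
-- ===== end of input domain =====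

-- B re-implements the same report in three phases (integer mismatch counts per offset,
-- first-argmin, then one reconstruction of the best window), instead of A's building a
-- difference-string list for every offset; same return value everywhere (A is total).

-- Shared formatting helpers (both Pythons contain these identical f-string/report lines).
def fmtDiff (reference_name : String) (r : Char) (pos : Int) (u : Char) : String :=
  if reference_name == "RSRS" then
    String.mk ([r] ++ PySem.Int.toChars pos ++ [u])
  else
    String.mk (['[', r, ']'] ++ PySem.Int.toChars pos ++ [u])

def pvNotFound (reference_name : String) : String :=
  "The sequence was not found in the " ++ reference_name ++ " sequence"

def pvReport (reference_name : String) (ignore_n : Bool) (m best : Int) (diffs : List String) (ignored : Int) : String :=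
  let result := "The entered sequence including " ++ PySem.Int.toStr m ++ " positions\n"
  let result := result ++ "The entered sequence matches positions " ++ PySem.Int.toStr (best + 1) ++ " to " ++ PySem.Int.toStr (best + m) ++ " in the " ++ reference_name ++ " sequence\n"
  let result :=
    if diffs ≠ [] then
      result ++ "There are " ++ PySem.Int.toStr (diffs.length : Int) ++ " differences between the entered sequence and the " ++ reference_name ++ " sequence:\n" ++ PySem.Str.join "\n" diffs
    else
      result ++ "There are no differences between the entered sequence and the " ++ reference_name ++ " sequence"
  if ignore_n && decide (0 < ignored) then
    result ++ "\n\nNote: The list of differences ignores " ++ PySem.Int.toStr ignored ++ " differences caused by 'N' in the input sequence."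
  else result

-- ===== PORT A =====
-- Inner j-loop of A: builds the difference strings and ignored-N count at offset i.
-- (Indices are always in range; pyGetD with a default transcribes the indexing exactly there.)
def aInner (ref user : List Char) (reference_name : String) (ignore_n : Bool) (i : Int) : List String × Int :=
  (PySem.List.pyRange 0 (user.length : Int) 1).foldl
    (fun (c : List String × Int) j =>
      let u := PySem.List.pyGetD user j ' '
      let r := PySem.List.pyGetD ref (i + j) ' '
      if u != r then
        if ignore_n && (u == 'N') then (c.1, c.2 + 1)
        else (c.1 ++ [fmtDiff reference_name r (i + j + 1) u], c.2)
      else c)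
    ([], 0)

-- One step of A's outer i-loop; state = (best_match_index, min_differences, differences, ignored_n_count).
def aStep (ref user : List Char) (reference_name : String) (ignore_n : Bool)
    (st : Int × Int × List String × Int) (i : Int) : Int × Int × List String × Int :=
  let cur := aInner ref user reference_name ignore_n i
  if ((cur.1.length : Int) < st.2.1) then (i, (cur.1.length : Int), cur.1, cur.2) else st

-- A's outer i-loop over range(len(ref) - len(user) + 1).
def aLoop (ref user : List Char) (reference_name : String) (ignore_n : Bool) : Int × Int × List String × Int :=
  (PySem.List.pyRange 0 ((ref.length : Int) - (user.length : Int) + 1) 1).foldl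
    (aStep ref user reference_name ignore_n)
    (-1, (user.length : Int) + 1, ([] : List String), 0)

def compare_aligned_sequences (reference_sequence : String) (user_sequence : String) (reference_name : String) (ignore_n : Bool) : String :=
  let st := aLoop reference_sequence.toList user_sequence.toList reference_name ignore_n
  if st.1 = -1 then
    pvNotFound reference_name
  else
    pvReport reference_name ignore_n (user_sequence.toList.length : Int) st.1 st.2.2.1 st.2.2.2

-- ===== PORT B =====
def pvMismatch (ref user : List Char) (ignore_n : Bool) (i j : Nat) : Bool :=
  (user.getD j ' ' != ref.getD (i + j) ' ') && !(ignore_n && (user.getD j ' ' == 'N'))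

-- Phase 1 entry: the mismatch count at offset i (no strings built).
def pvCount (ref user : List Char) (ignore_n : Bool) (i : Nat) : Nat :=
  ((List.range user.length).filter (pvMismatch ref user ignore_n i)).length

-- Phase 3: the difference strings at the chosen offset only.
def pvDiffs (ref user : List Char) (reference_name : String) (ignore_n : Bool) (i : Nat) : List String :=
  (List.range user.length).filterMap (fun j =>
    if pvMismatch ref user ignore_n i j then
      some (fmtDiff reference_name (ref.getD (i + j) ' ') ((i : Int) + (j : Int) + 1) (user.getD j ' '))
    else none)

def pvIgnored (ref user : List Char) (i : Nat) : Nat :=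
  ((List.range user.length).filter (fun j =>
    (user.getD j ' ' == 'N') && (user.getD j ' ' != ref.getD (i + j) ' '))).length

-- Phase 2: first argmin over the counts list.
def bBest (ref user : List Char) (ignore_n : Bool) : Nat :=
  let counts := (List.range (ref.length - user.length + 1)).map (pvCount ref user ignore_n)
  (List.range' 1 (counts.length - 1)).foldl
    (fun b i => if counts.getD i 0 < counts.getD b 0 then i else b) 0

def compare_aligned_sequences_alt (reference_sequence : String) (user_sequence : String) (reference_name : String) (ignore_n : Bool) : String :=
  let ref := reference_sequence.toList
  let user := user_sequence.toList
  if ref.length < user.length then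
    pvNotFound reference_name
  else
    let best := bBest ref user ignore_n
    pvReport reference_name ignore_n (user.length : Int) (best : Int)
      (pvDiffs ref user reference_name ignore_n best)
      (if ignore_n then (pvIgnored ref user best : Int) else 0)

-- ===== PRECONDITION & SPEC =====
def Spec_compare_aligned_sequences (reference_sequence : String) (user_sequence : String) (reference_name : String) (ignore_n : Bool) (out : String) : Prop := out = compare_aligned_sequences_alt reference_sequence user_sequence reference_name ignore_n
instance (reference_sequence : String) (user_sequence : String) (reference_name : String) (ignore_n : Bool) (out : String) : Decidable (Spec_compare_aligned_sequences reference_sequence user_sequence reference_name ignore_n out) := by unfold Spec_compare_aligned_sequences; infer_instance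

-- ===== CLAIM (what is proved, stated in full; the proofs are below) =====
def Claim_equal_compare_aligned_sequences : Prop := ∀ (reference_sequence : String) (user_sequence : String) (reference_name : String) (ignore_n : Bool), Dom_compare_aligned_sequences reference_sequence user_sequence reference_name ignore_n → Spec_compare_aligned_sequences reference_sequence user_sequence reference_name ignore_n (compare_aligned_sequences reference_sequence user_sequence reference_name ignore_n)

-- ===== LEMMAS AND PROOFS =====

-- First argmin over offsets 0..k of the count function c (strict-improvement recursion;
-- this is what BOTH loops compute, A fused with the scan, B on the counts list).
def bRec (c : Nat → Nat) : Nat → Nat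
  | 0 => 0
  | k + 1 => if c (k + 1) < c (bRec c k) then k + 1 else bRec c k

theorem bRec_le (c : Nat → Nat) (k : Nat) : bRec c k ≤ k := by
  induction k with
  | zero => simp [bRec]
  | succ k ih => unfold bRec; split <;> omega

-- generic shape of A's inner loop
theorem foldl_inner_shape (p q : Nat → Bool) (f : Nat → String) (l : List Nat)
    (acc : List String) (t : Int) :
    l.foldl (fun (c : List String × Int) j =>
        if p j then (if q j then (c.1, c.2 + 1) else (c.1 ++ [f j], c.2)) else c) (acc, t)
      = (acc ++ l.filterMap (fun j => if p j && !q j then some (f j) else none),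
         t + ((l.filter (fun j => p j && q j)).length : Int)) := by
  induction l generalizing acc t with
  | nil => simp
  | cons x l ih =>
    by_cases hp : p x = true <;> by_cases hq : q x = true
    · simp [hp, hq, ih]
      ring
    · simp [hp, hq, ih]
    · simp [hp, hq, ih]
    · simp [hp, hq, ih]

theorem length_filterMap_if (p : Nat → Bool) (f : Nat → String) (l : List Nat) :
    (l.filterMap (fun j => if p j then some (f j) else none)).length = (l.filter p).length := by
  induction l with
  | nil => rfl
  | cons x l ih => by_cases hp : p x = true <;> simp [hp, ih]

theorem aInner_eq (ref user : List Char) (rn : String) (ign : Bool) (i : Nat) :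
    aInner ref user rn ign (i : Int)
      = (pvDiffs ref user rn ign i, (if ign then (pvIgnored ref user i : Int) else 0)) := by
  unfold aInner
  rw [PySem.List.pyRange_zero_natCast, List.foldl_map]
  have hstep : (fun (c : List String × Int) (j : Nat) =>
      let u := PySem.List.pyGetD user ((j : Nat) : Int) ' '
      let r := PySem.List.pyGetD ref ((i : Int) + (j : Nat)) ' '
      if u != r then
        if ign && (u == 'N') then (c.1, c.2 + 1)
        else (c.1 ++ [fmtDiff rn r ((i : Int) + j + 1) u], c.2)
      else c)
      = (fun (c : List String × Int) j =>
        if (user.getD j ' ' != ref.getD (i + j) ' ') then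
          (if (ign && (user.getD j ' ' == 'N')) then (c.1, c.2 + 1)
           else (c.1 ++ [fmtDiff rn (ref.getD (i + j) ' ') ((i : Int) + (j : Int) + 1) (user.getD j ' ')], c.2))
        else c) := by
    funext c j
    have hij : (i : Int) + (j : Nat) = ((i + j : Nat) : Int) := by push_cast; ring
    simp only [hij, PySem.List.pyGetD_natCast]
  rw [hstep, foldl_inner_shape]
  simp only [Prod.mk.injEq]
  refine ⟨?_, ?_⟩
  · unfold pvDiffs pvMismatch
    simp
  · cases ign with
    | false => simp
    | true =>
      simp only [Bool.true_and, zero_add]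
      unfold pvIgnored
      congr 1
      exact congrArg List.length (List.filter_congr (fun j _ => Bool.and_comm _ _))

theorem pvDiffs_length (ref user : List Char) (rn : String) (ign : Bool) (i : Nat) :
    (pvDiffs ref user rn ign i).length = pvCount ref user ign i := by
  unfold pvDiffs pvCount
  exact length_filterMap_if _ _ _

theorem aStep_eq (ref user : List Char) (rn : String) (ign : Bool)
    (st : Int × Int × List String × Int) (i : Nat) :
    aStep ref user rn ign st (i : Int)
      = if ((pvCount ref user ign i : Int) < st.2.1) then
          ((i : Int), (pvCount ref user ign i : Int), pvDiffs ref user rn ign i,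
           (if ign then (pvIgnored ref user i : Int) else 0))
        else st := by
  simp only [aStep, aInner_eq, pvDiffs_length]

-- A's outer loop over offsets 0..k lands on the first argmin, with its count, diffs and ignored count.
theorem aLoop_pyRange_eq (ref user : List Char) (rn : String) (ign : Bool) (k : Nat) :
    (PySem.List.pyRange 0 ((k : Int) + 1) 1).foldl (aStep ref user rn ign)
        (-1, (user.length : Int) + 1, ([] : List String), 0)
      = (((bRec (pvCount ref user ign) k : Nat) : Int),
         ((pvCount ref user ign (bRec (pvCount ref user ign) k) : Nat) : Int),
         pvDiffs ref user rn ign (bRec (pvCount ref user ign) k),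
         (if ign then (pvIgnored ref user (bRec (pvCount ref user ign) k) : Int) else 0)) := by
  set c := pvCount ref user ign with hc
  induction k with
  | zero =>
    simp only [Nat.cast_zero]
    rw [PySem.List.pyRange_one_singleton]
    simp only [List.foldl_cons, List.foldl_nil]
    have h0 := aStep_eq ref user rn ign (-1, (user.length : Int) + 1, ([] : List String), 0) 0
    simp only [Nat.cast_zero] at h0
    rw [h0]
    have hle : c 0 ≤ user.length := by
      rw [hc]; unfold pvCount
      exact le_trans (List.length_filter_le _ _) (by simp)
    rw [if_pos (by
      show ((c 0 : Nat) : Int) < (user.length : Int) + 1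
      exact_mod_cast Nat.lt_succ_of_le hle)]
    rfl
  | succ k ih =>
    have hsplit : (((k + 1 : Nat) : Int) + 1) = (((k : Int) + 1) + 1) := by push_cast; ring
    have hpos : (0 : Int) ≤ (k : Int) + 1 := by positivity
    rw [hsplit, PySem.List.pyRange_one_succ_right hpos, List.foldl_append, ih]
    simp only [List.foldl_cons, List.foldl_nil]
    have hk1 : ((k : Int) + 1) = (((k + 1 : Nat)) : Int) := by push_cast; ring
    rw [hk1, aStep_eq]
    have hproj : ((((bRec c k : Nat) : Int),
        ((c (bRec c k) : Nat) : Int),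
        pvDiffs ref user rn ign (bRec c k),
        (if ign then (pvIgnored ref user (bRec c k) : Int) else 0)) :
          Int × Int × List String × Int).2.1 = ((c (bRec c k) : Nat) : Int) := rfl
    rw [hproj]
    by_cases hlt : c (k + 1) < c (bRec c k)
    · rw [if_pos (by exact_mod_cast hlt)]
      simp [bRec, hlt, ← hc]
    · rw [if_neg (by exact_mod_cast hlt)]
      simp [bRec, hlt]

theorem aLoop_eq (ref user : List Char) (rn : String) (ign : Bool)
    (h : user.length ≤ ref.length) :
    aLoop ref user rn ign
      = (((bRec (pvCount ref user ign) (ref.length - user.length) : Nat) : Int),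
         ((pvCount ref user ign (bRec (pvCount ref user ign) (ref.length - user.length)) : Nat) : Int),
         pvDiffs ref user rn ign (bRec (pvCount ref user ign) (ref.length - user.length)),
         (if ign then (pvIgnored ref user (bRec (pvCount ref user ign) (ref.length - user.length)) : Int) else 0)) := by
  unfold aLoop
  have hb : (ref.length : Int) - (user.length : Int) + 1
      = (((ref.length - user.length : Nat) : Int) + 1) := by push_cast [h]; ring
  rw [hb, aLoop_pyRange_eq]

-- A's loop on an empty offset range leaves the initial state (best stays -1).
theorem aLoop_nil (ref user : List Char) (rn : String) (ign : Bool)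
    (h : ref.length < user.length) :
    aLoop ref user rn ign = (-1, (user.length : Int) + 1, ([] : List String), 0) := by
  unfold aLoop
  have h2 : (ref.length : Int) - (user.length : Int) + 1 ≤ 0 := by
    have : (ref.length : Int) < (user.length : Int) := by exact_mod_cast h
    omega
  rw [PySem.List.pyRange_one_eq_nil h2]
  rfl

-- B's argmin loop over the counts list computes the same recursion.
theorem bLoop_eq (ref user : List Char) (ign : Bool) (K : Nat) (k : Nat) (hk : k ≤ K) :
    (List.range' 1 k).foldl
        (fun b i => if ((List.range (K + 1)).map (pvCount ref user ign)).getD i 0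
                       < ((List.range (K + 1)).map (pvCount ref user ign)).getD b 0 then i else b) 0
      = bRec (pvCount ref user ign) k := by
  set c := pvCount ref user ign with hc
  induction k with
  | zero => simp [bRec]
  | succ k ih =>
    have hk' : k ≤ K := Nat.le_of_succ_le hk
    have hcons : List.range' 1 (k + 1) = List.range' 1 k ++ [1 + 1 * k] := List.range'_concat
    rw [hcons, List.foldl_append, ih hk']
    simp only [List.foldl_cons, List.foldl_nil]
    have h1k : 1 + 1 * k = k + 1 := by omega
    rw [h1k]
    have hgd : ∀ j : Nat, j ≤ K → ((List.range (K + 1)).map c).getD j 0 = c j := by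
      intro j hj
      exact PySem.List.getD_map_range c (K + 1) j 0 (by omega)
    rw [hgd (k + 1) hk, hgd (bRec c k) (le_trans (bRec_le c k) hk')]
    rfl

theorem bBest_eq (ref user : List Char) (ign : Bool) :
    bBest ref user ign = bRec (pvCount ref user ign) (ref.length - user.length) := by
  unfold bBest
  simp only [List.length_map, List.length_range, Nat.add_sub_cancel]
  exact bLoop_eq ref user ign (ref.length - user.length) (ref.length - user.length) le_rfl

-- ===== VERDICT (by name: the statement is the Claim_ definition above) =====
theorem compare_aligned_sequences_spec : Claim_equal_compare_aligned_sequences := by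
  intro rs us rn ign _
  unfold Spec_compare_aligned_sequences
  simp only [compare_aligned_sequences, compare_aligned_sequences_alt]
  by_cases hnm : rs.toList.length < us.toList.length
  · rw [aLoop_nil _ _ _ _ hnm, if_pos hnm, if_pos rfl]
  · rw [if_neg hnm]
    have hnm' : us.toList.length ≤ rs.toList.length := Nat.le_of_not_lt hnm
    rw [aLoop_eq _ _ _ _ hnm', bBest_eq]
    have h3 : ¬ (((bRec (pvCount rs.toList us.toList ign) (rs.toList.length - us.toList.length) : Nat) : Int) = -1) := by
      omega
    simp only [if_neg h3]
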